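-- pv_equiv track=rewrite | github.com/VSK321/chrysanthemum | chrysanthemum/problems/motif_identification_problem.py | evaluate_motif_solution
-- ===== SOURCE A (Python) =====
-- def hamming_distance(text_a: list[str], text_b: str) -> int:
--     counter = 0
--     for item_index in range(len(text_a)):
--         #if text_a[item_index][0] == "|":
--         #    counter += 1
--         if text_b[item_index] not in text_a[item_index]:
--             counter += 1
--             #if text_a[item_index][0] == "|":
--             #    counter += 1
--     return counter
--
-- def evaluate_motif_solution(problem: list[str], solution: list[str]) -> float:
--     #Time complexity is an issue
--     hamming_counter = 0
--     solution_length = len(solution)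
--     #solution = ''.join(solution)
--     for string in problem:
--         lowest_hamming_counter = 10**10
--         for index in range(len(string)-solution_length+1):
--             curr_hamming_distance = hamming_distance(solution, string[index:index+solution_length])
--             if curr_hamming_distance < lowest_hamming_counter:
--                 lowest_hamming_counter = curr_hamming_distance
--         hamming_counter += lowest_hamming_counter
--     return hamming_counter
-- ===== SOURCE B (Python) =====
-- # Scatter/correlation rewrite: invert the loops -- precompute, for every
-- # character, the motif columns that accept it; one pass over each string
-- # scatters +1 into the match-count of every window that character supports,
-- # then the answer is k - max(match) per string (no window loop, no slicing).
-- BIG = 10 ** 10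
--
-- def evaluate_motif_solution(problem, solution):
--     k = len(solution)
--     alphabet = set(''.join(solution))
--     cols_of = {ch: [j for j in range(k) if ch in solution[j]] for ch in alphabet}
--     total = 0
--     for s in problem:
--         w = len(s) - k + 1
--         if w <= 0:
--             total += BIG
--             continue
--         match = [0] * w
--         for p, ch in enumerate(s):
--             for j in cols_of.get(ch, ()):
--                 i = p - j
--                 if 0 <= i < w:
--                     match[i] += 1
--         total += min(BIG, k - max(match))
--     return total
-- ===== Notes on version B (the rewrite author's own statement) =====
-- stated objective: alternative
-- what changed: Inverts the traversal: instead of scoring each window against each motif column (window-by-window slicing and rescanning), B precomputes a char->accepting-columns table, makes one scatter pass over each string adding +1 to the match count of every window the scanned character supports, and returns k - max(match) per string.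
import Mathlib
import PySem

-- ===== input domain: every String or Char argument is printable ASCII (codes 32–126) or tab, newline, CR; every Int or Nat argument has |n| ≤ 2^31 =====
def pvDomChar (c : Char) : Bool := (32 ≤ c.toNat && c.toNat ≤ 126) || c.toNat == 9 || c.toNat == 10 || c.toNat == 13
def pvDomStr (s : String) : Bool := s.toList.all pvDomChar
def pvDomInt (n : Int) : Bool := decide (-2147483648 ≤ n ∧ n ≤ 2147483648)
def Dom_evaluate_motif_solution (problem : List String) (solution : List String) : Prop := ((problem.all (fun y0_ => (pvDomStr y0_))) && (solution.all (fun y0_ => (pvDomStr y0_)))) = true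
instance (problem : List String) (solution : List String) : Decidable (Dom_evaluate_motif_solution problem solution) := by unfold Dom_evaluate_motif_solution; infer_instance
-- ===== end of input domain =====

-- B inverts the loops (scatter/correlation): a per-character table of accepting motif
-- columns is built once; one pass over each string scatters +1 into the match count of
-- every window supported by that character, and the per-string answer is k - max(match).


-- ===== PORT A =====
-- helper hamming_distance; every indexed access at its call sites is in range (the
-- window slice has exactly len(text_a) characters), transliterated via pyGetD
def hamming_distance (text_a : List String) (text_b : List Char) : Int :=
  (PySem.List.pyRange 0 (text_a.length : Int) 1).foldl
    (fun counter item_index =>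
      if !(PySem.Chars.isIn [PySem.List.pyGetD text_b item_index ' ']
            (PySem.List.pyGetD text_a item_index "").toList)
      then counter + 1 else counter) 0

def evaluate_motif_solution (problem : List String) (solution : List String) : Int :=
  let solution_length : Int := (solution.length : Int)
  problem.foldl
    (fun hamming_counter string =>
      let lowest :=
        (PySem.List.pyRange 0 ((string.toList.length : Int) - solution_length + 1) 1).foldl
          (fun lowest_hamming_counter index =>
            let curr := hamming_distance solution
                (PySem.List.slice string.toList (some index) (some (index + solution_length)))
            if curr < lowest_hamming_counter then curr else lowest_hamming_counter)
          (10 ^ 10)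
      hamming_counter + lowest) 0

-- ===== PORT B =====
-- ''.join(solution) on the list side is the flatten of the character lists (exact)
def evaluate_motif_solution_alt (problem : List String) (solution : List String) : Int :=
  let k : Int := (solution.length : Int)
  let alphabet : PySem.Set Char := PySem.Set.ofList (solution.map String.toList).flatten
  let cols_of : PySem.Dict Char (List Int) :=
    alphabet.foldl
      (fun d ch => d.insert ch
        ((PySem.List.pyRange 0 k 1).filter
          (fun j => PySem.Chars.isIn [ch] (PySem.List.pyGetD solution j "").toList)))
      PySem.Dict.empty
  problem.foldl
    (fun total s =>
      let sl := s.toList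
      let w : Int := (sl.length : Int) - k + 1
      if w ≤ 0 then total + 10 ^ 10
      else
        let mism :=
          (PySem.List.enumerate sl 0).foldl
            (fun mism pch =>
              (cols_of.getD pch.2 []).foldl
                (fun mism j =>
                  let i := pch.1 - j
                  if 0 ≤ i ∧ i < w
                  then PySem.List.pySetD mism i (PySem.List.pyGetD mism i 0 + 1)
                  else mism)
                mism)
            (List.replicate w.toNat (0 : Int))
        total + min (10 ^ 10) (k - ((PySem.List.max? mism (fun x => x)).getD 0))) 0

-- ===== PRECONDITION & SPEC =====
def Spec_evaluate_motif_solution (problem : List String) (solution : List String) (out : Int) : Prop := out = evaluate_motif_solution_alt problem solution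
instance (problem : List String) (solution : List String) (out : Int) : Decidable (Spec_evaluate_motif_solution problem solution out) := by unfold Spec_evaluate_motif_solution; infer_instance

-- ===== CLAIM (what is proved, stated in full; the proofs are below) =====
def Claim_equal_evaluate_motif_solution : Prop := ∀ (problem : List String) (solution : List String), Dom_evaluate_motif_solution problem solution → Spec_evaluate_motif_solution problem solution (evaluate_motif_solution problem solution)

-- ===== LEMMAS AND PROOFS =====

-- column j of the motif accepts character c
def pvOcc (solution : List String) (c : Char) (j : Nat) : Bool :=
  (solution.getD j "").toList.contains c

-- the list of accepting columns for c, as B's dict stores it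
def pvCols (solution : List String) (c : Char) : List Int :=
  ((List.range solution.length).filter (fun j => pvOcc solution c j)).map (fun j : Nat => (j : Int))

-- contribution of one scanned position p (holding c) to the match count of window i
def pvAdd1 (solution : List String) (c : Char) (p i : Nat) : Int :=
  if i ≤ p ∧ p - i < solution.length ∧ pvOcc solution c (p - i) = true then 1 else 0

-- total contribution of a suffix of the string starting at absolute position p0
def pvTot (solution : List String) (l : List Char) (p0 i : Nat) : Int :=
  match l with
  | [] => 0
  | c :: l' => pvAdd1 solution c p0 i + pvTot solution l' (p0 + 1) i

-- the match count of window i (number of accepting columns)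
def pvM (solution : List String) (sl : List Char) (i : Nat) : Int :=
  ((List.range solution.length).countP (fun j => pvOcc solution (sl.getD (i + j) ' ') j) : Nat)

-- a single character is a substring iff it occurs
theorem pv_isIn_singleton (c : Char) (l : List Char) :
    PySem.Chars.isIn [c] l = l.contains c := by
  rcases h : l.contains c with _ | _
  · simp only [List.contains_eq_mem, decide_eq_false_iff_not] at h
    rw [← Bool.not_eq_true, PySem.Chars.isIn_iff_infix]
    intro hinf
    exact h (hinf.subset (List.mem_singleton_self c))
  · simp only [List.contains_eq_mem, decide_eq_true_eq] at h
    rw [PySem.Chars.isIn_iff_infix]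
    obtain ⟨l1, l2, rfl⟩ := List.append_of_mem h
    exact ⟨l1, l2, by simp⟩

-- the filtered range B stores under key c is pvCols
theorem pv_filter_eq_cols (solution : List String) (c : Char) :
    (PySem.List.pyRange 0 (solution.length : Int) 1).filter
        (fun j => PySem.Chars.isIn [c] (PySem.List.pyGetD solution j "").toList)
      = pvCols solution c := by
  rw [PySem.List.pyRange_zero_nat, List.filter_map]
  unfold pvCols
  refine congrArg _ (List.filter_congr ?_)
  intro j _
  simp only [Function.comp_apply, PySem.List.pyGetD_natCast, pv_isIn_singleton, pvOcc]

-- dict-comprehension lookup: getD over a fold of inserts with per-key values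
theorem pv_dict_fold_getD (L : List Char) (f : Char → List Int) (x : Char) :
    ∀ d : PySem.Dict Char (List Int),
    (L.foldl (fun d ch => d.insert ch (f ch)) d).getD x []
      = if x ∈ L then f x else d.getD x [] := by
  induction L with
  | nil => simp
  | cons c L ih =>
      intro d
      rw [List.foldl_cons, ih]
      by_cases hL : x ∈ L
      · rw [if_pos hL, if_pos (List.mem_cons_of_mem c hL)]
      · rw [if_neg hL, PySem.Dict.getD_insert]
        by_cases hc : x = c
        · rw [if_pos hc, if_pos (List.mem_cons.mpr (Or.inl hc)), hc]
        · rw [if_neg hc,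
            if_neg (fun h => (List.mem_cons.mp h).elim hc hL)]

-- B's dict lookup is pvCols for every character
theorem pv_getD_cols (solution : List String) (c : Char) :
    ((PySem.Set.ofList (solution.map String.toList).flatten).foldl
      (fun d ch => d.insert ch
        ((PySem.List.pyRange 0 (solution.length : Int) 1).filter
          (fun j => PySem.Chars.isIn [ch] (PySem.List.pyGetD solution j "").toList)))
      PySem.Dict.empty).getD c []
      = pvCols solution c := by
  rw [pv_dict_fold_getD]
  by_cases hm : c ∈ PySem.Set.ofList (solution.map String.toList).flatten
  · rw [if_pos hm, pv_filter_eq_cols]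
  · rw [if_neg hm, PySem.Dict.getD_empty]
    rw [PySem.Set.mem_ofList, List.mem_flatten] at hm
    have hnil : (List.range solution.length).filter (fun j => pvOcc solution c j) = [] := by
      rw [List.filter_eq_nil_iff]
      intro j hj hocc
      rw [List.mem_range] at hj
      apply hm
      refine ⟨(solution[j]'hj).toList, List.mem_map.mpr ⟨solution[j]'hj, List.getElem_mem hj, rfl⟩, ?_⟩
      have hgd : solution.getD j "" = solution[j]'hj := List.getD_eq_getElem solution "" hj
      rw [pvOcc, hgd, List.contains_eq_mem, decide_eq_true_eq] at hocc
      exact hocc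
    rw [pvCols, hnil, List.map_nil]

-- setting one cell of a mapped range is a pointwise update
theorem pv_set_map_range (w : Nat) (g : Nat → Int) (t : Nat) (v : Int) :
    ((List.range w).map g).set t v
      = (List.range w).map (fun i => if i = t then v else g i) := by
  apply List.ext_getElem
  · simp
  · intro n h1 h2
    simp only [List.getElem_set, List.getElem_map, List.getElem_range]
    by_cases h : n = t
    · rw [if_pos h.symm, if_pos h]
    · rw [if_neg (fun e => h e.symm), if_neg h]

-- the inner scatter loop over the (nodup) column list, pointwise
theorem pv_inner (w p : Nat) (js : List Int) (hnd : js.Nodup) (g : Nat → Int) :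
    js.foldl
        (fun mism j =>
          let i := (p : Int) - j
          if 0 ≤ i ∧ i < (w : Int)
          then PySem.List.pySetD mism i (PySem.List.pyGetD mism i 0 + 1)
          else mism)
        ((List.range w).map g)
      = (List.range w).map
          (fun i => g i + if ((p : Int) - (i : Int)) ∈ js then 1 else 0) := by
  induction js generalizing g with
  | nil => simp
  | cons j rest ih =>
      obtain ⟨hj, hrest⟩ := List.nodup_cons.mp hnd
      rw [List.foldl_cons]
      by_cases hg : 0 ≤ (p : Int) - j ∧ (p : Int) - j < (w : Int)
      · have htw : ((p : Int) - j).toNat < w := by omega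
        have hlen : ((p : Int) - j).toNat < ((List.range w).map g).length := by
          simpa using htw
        rw [if_pos hg, PySem.List.pySetD_of_nonneg _ _ hg.1,
          PySem.List.pyGetD_eq_getElem _ _ hg.1 (by simpa using hg.2),
          List.getElem_map, List.getElem_range, pv_set_map_range]
        rw [ih hrest]
        apply List.map_congr_left
        intro i hi
        rw [List.mem_range] at hi
        by_cases hit : i = ((p : Int) - j).toNat
        · have hpij : (p : Int) - (i : Int) = j := by omega
          rw [if_pos hit, hpij, if_neg hj,
            if_pos (List.mem_cons_self ..), hit]
          ring
        · have hpij : (p : Int) - (i : Int) ≠ j := by omega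
          rw [if_neg hit]
          by_cases hr : ((p : Int) - (i : Int)) ∈ rest
          · rw [if_pos hr, if_pos (List.mem_cons_of_mem j hr)]
          · rw [if_neg hr, if_neg (by
              intro hmem
              rcases List.mem_cons.mp hmem with h | h
              · exact hpij h
              · exact hr h)]
      · rw [if_neg hg, ih hrest]
        apply List.map_congr_left
        intro i hi
        rw [List.mem_range] at hi
        by_cases hr : ((p : Int) - (i : Int)) ∈ rest
        · rw [if_pos hr, if_pos (List.mem_cons_of_mem j hr)]
        · rw [if_neg hr, if_neg (by
            intro hmem
            rcases List.mem_cons.mp hmem with h | h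
            · exact absurd ⟨by omega, by omega⟩ hg
            · exact hr h)]

-- membership in pvCols, read as pvAdd1
theorem pv_mem_cols (solution : List String) (c : Char) (p i : Nat) :
    (if ((p : Int) - (i : Int)) ∈ pvCols solution c then (1 : Int) else 0)
      = pvAdd1 solution c p i := by
  unfold pvAdd1 pvCols
  have hmem : ((p : Int) - (i : Int)) ∈
      ((List.range solution.length).filter (fun j => pvOcc solution c j)).map (fun j : Nat => (j : Int))
      ↔ (i ≤ p ∧ p - i < solution.length ∧ pvOcc solution c (p - i) = true) := by
    constructor
    · intro hm
      obtain ⟨j, hj, hcast⟩ := List.mem_map.mp hm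
      rw [List.mem_filter, List.mem_range] at hj
      have hip : i ≤ p := by omega
      have hji : j = p - i := by omega
      exact ⟨hip, by omega, by rw [← hji]; exact hj.2⟩
    · intro h
      exact List.mem_map.mpr ⟨p - i,
        List.mem_filter.mpr ⟨List.mem_range.mpr h.2.1, h.2.2⟩, by omega⟩
  by_cases h : i ≤ p ∧ p - i < solution.length ∧ pvOcc solution c (p - i) = true
  · rw [if_pos (hmem.mpr h), if_pos h]
  · rw [if_neg (fun hm => h (hmem.mp hm)), if_neg h]

-- the outer scatter loop, pointwise
theorem pv_outer (solution : List String) (w : Nat) (l : List Char) :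
    ∀ (p0 : Nat) (g : Nat → Int),
    (PySem.List.enumerate l (p0 : Int)).foldl
        (fun mism pch =>
          (pvCols solution pch.2).foldl
            (fun mism j =>
              let i := pch.1 - j
              if 0 ≤ i ∧ i < (w : Int)
              then PySem.List.pySetD mism i (PySem.List.pyGetD mism i 0 + 1)
              else mism)
            mism)
        ((List.range w).map g)
      = (List.range w).map (fun i => g i + pvTot solution l p0 i) := by
  induction l with
  | nil =>
      intro p0 g
      simp [PySem.List.enumerate_nil, pvTot]
  | cons c l' ih =>
      intro p0 g
      rw [PySem.List.enumerate_cons, List.foldl_cons]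
      have hnd : (pvCols solution c).Nodup :=
        (List.nodup_range.filter _).map (fun a b h => by exact_mod_cast h)
      dsimp only
      rw [pv_inner w p0 (pvCols solution c) hnd g]
      have hmap : (List.range w).map
            (fun i => g i + if ((p0 : Int) - (i : Int)) ∈ pvCols solution c then 1 else 0)
          = (List.range w).map (fun i => g i + pvAdd1 solution c p0 i) :=
        List.map_congr_left (fun i _ => by rw [pv_mem_cols])
      rw [hmap]
      have hcast : (p0 : Int) + 1 = ((p0 + 1 : Nat) : Int) := by push_cast; ring
      rw [hcast, ih (p0 + 1) (fun i => g i + pvAdd1 solution c p0 i)]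
      apply List.map_congr_left
      intro i _
      simp only [pvTot]
      ring

-- pvTot as an indexed sum over the scanned positions
theorem pv_tot_sum (solution : List String) (l : List Char) :
    ∀ (p0 i : Nat),
    pvTot solution l p0 i
      = ((List.range l.length).map
          (fun t => pvAdd1 solution (l.getD t ' ') (p0 + t) i)).sum := by
  induction l with
  | nil => intro p0 i; simp [pvTot]
  | cons c l' ih =>
      intro p0 i
      simp only [pvTot, List.length_cons, List.range_succ_eq_map, List.map_cons, List.sum_cons,
        List.getD_cons_zero, Nat.add_zero, List.map_map]
      congr 1
      rw [ih (p0 + 1) i]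
      apply congrArg
      apply List.map_congr_left
      intro t _
      simp only [Function.comp_apply, Nat.succ_eq_add_one, List.getD_cons_succ]
      have : p0 + (t + 1) = p0 + 1 + t := by omega
      rw [this]

-- a mapped range sum as a Finset range sum
theorem pv_sum_range (n : Nat) (f : Nat → Int) :
    ((List.range n).map f).sum = ∑ t ∈ Finset.range n, f t := by
  induction n with
  | zero => simp
  | succ n ih =>
      rw [List.range_succ, List.map_append, List.sum_append, Finset.sum_range_succ, ih]
      simp

-- the scattered total of the whole string is the match count of the window
theorem pv_tot_eq_M (solution : List String) (sl : List Char) (i : Nat)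
    (hik : i + solution.length ≤ sl.length) :
    pvTot solution sl 0 i = pvM solution sl i := by
  rw [pv_tot_sum, pv_sum_range]
  have hsub : Finset.Ico i (i + solution.length) ⊆ Finset.range sl.length := by
    intro t ht
    rw [Finset.mem_Ico] at ht
    rw [Finset.mem_range]
    omega
  rw [← Finset.sum_subset hsub (by
    intro t htr hti
    rw [Finset.mem_range] at htr
    rw [Finset.mem_Ico] at hti
    rw [Nat.zero_add, pvAdd1, if_neg]
    intro h
    exact hti ⟨h.1, by omega⟩)]
  rw [Finset.sum_Ico_eq_sum_range]
  have hk : i + solution.length - i = solution.length := by omega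
  rw [hk]
  have hsum : ∑ j ∈ Finset.range solution.length,
        pvAdd1 solution (sl.getD (i + j) ' ') (i + j) i
      = ∑ j ∈ Finset.range solution.length,
        (if pvOcc solution (sl.getD (i + j) ' ') j = true then (1 : Int) else 0) := by
    apply Finset.sum_congr rfl
    intro j hj
    rw [Finset.mem_range] at hj
    rw [pvAdd1]
    have hji : i + j - i = j := by omega
    rw [hji]
    by_cases ho : pvOcc solution (sl.getD (i + j) ' ') j = true
    · rw [if_pos ⟨by omega, by omega, ho⟩, if_pos ho]
    · rw [if_neg (fun hc => ho hc.2.2), if_neg ho]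
  have hshift : ∀ j ∈ Finset.range solution.length,
      pvAdd1 solution (sl.getD (i + j) ' ') (0 + (i + j)) i
        = pvAdd1 solution (sl.getD (i + j) ' ') (i + j) i := by
    intro j _
    rw [Nat.zero_add]
  rw [Finset.sum_congr rfl hshift, hsum, ← pv_sum_range,
    PySem.List.sum_map_ite_one_zero, pvM]

-- A's hamming distance of the window at i is k minus the match count
theorem pv_ham_eq (solution : List String) (sl : List Char) (i : Nat)
    (hle : i + solution.length ≤ sl.length) :
    hamming_distance solution ((sl.drop i).take solution.length)
      = (solution.length : Int) - pvM solution sl i := by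
  unfold hamming_distance
  rw [PySem.List.foldl_if_add_one, zero_add, PySem.List.pyRange_zero_nat, List.countP_map]
  have hcong : ∀ j ∈ List.range solution.length,
      (((fun item_index => !(PySem.Chars.isIn
            [PySem.List.pyGetD ((sl.drop i).take solution.length) item_index ' ']
            (PySem.List.pyGetD solution item_index "").toList)) ∘ (fun kk : Nat => (kk : Int))) j
        = true)
      ↔ ((!(pvOcc solution (sl.getD (i + j) ' ') j)) = true) := by
    intro j hj
    rw [List.mem_range] at hj
    have hij : i + j < sl.length := by omega
    have hwin : ((sl.drop i).take solution.length).getD j ' ' = sl.getD (i + j) ' ' := by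
      rw [List.getD_eq_getElem?_getD, List.getElem?_take, if_pos hj, List.getElem?_drop,
        List.getElem?_eq_getElem hij, Option.getD_some, List.getD_eq_getElem?_getD,
        List.getElem?_eq_getElem hij, Option.getD_some]
    simp only [Function.comp_apply, PySem.List.pyGetD_natCast, pv_isIn_singleton, pvOcc, hwin]
  rw [List.countP_congr hcong]
  have hsplit := List.length_eq_countP_add_countP
    (fun j => pvOcc solution (sl.getD (i + j) ' ') j) (l := List.range solution.length)
  rw [List.length_range] at hsplit
  have hle : (List.range solution.length).countP
      (fun j => pvOcc solution (sl.getD (i + j) ' ') j) ≤ solution.length :=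
    le_of_le_of_eq List.countP_le_length (List.length_range)
  have hnot : (List.range solution.length).countP (fun j => !(pvOcc solution (sl.getD (i + j) ' ') j))
      = (List.range solution.length).countP (fun a => decide ¬ (pvOcc solution (sl.getD (i + a) ' ') a) = true) := by
    apply List.countP_congr
    intro x _
    simp
  rw [pvM, hnot]
  omega

-- a running minimum of k - x against a running maximum of x
theorem pv_fold_min_max (k : Int) (t : List Int) (b : Int) :
    (t.map (fun x => k - x)).foldl min (k - b) = k - t.foldl max b := by
  induction t generalizing b with
  | nil => rfl
  | cons x t ih =>
      simp only [List.map_cons, List.foldl_cons]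
      rw [show min (k - b) (k - x) = k - max b x by omega]
      exact ih (max b x)

theorem pv_foldl_max_max (t : List Int) (a b : Int) :
    t.foldl max (max a b) = max a (t.foldl max b) := by
  induction t generalizing b with
  | nil => rfl
  | cons x t ih =>
      simp only [List.foldl_cons]
      rw [show max (max a b) x = max a (max b x) by omega]
      exact ih (max b x)

-- a running 'keep the smaller' loop is a fold of min over the mapped values
theorem pv_fold_min_if (f : Nat → Int) (l : List Nat) : ∀ a : Int,
    l.foldl (fun acc t => if f t < acc then f t else acc) a = (l.map f).foldl min a := by
  induction l with
  | nil => intro a; rfl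
  | cons x t ih =>
      intro a
      rw [List.foldl_cons, List.map_cons, List.foldl_cons]
      have hmin : (if f x < a then f x else a) = min a (f x) := by omega
      rw [hmin, ih]

-- the per-string value computed by A's window loop equals B's per-string contribution
theorem pv_perString (solution : List String) (s : String) :
    (PySem.List.pyRange 0 ((s.toList.length : Int) - (solution.length : Int) + 1) 1).foldl
        (fun lowest_hamming_counter index =>
          let curr := hamming_distance solution
              (PySem.List.slice s.toList (some index) (some (index + (solution.length : Int))))
          if curr < lowest_hamming_counter then curr else lowest_hamming_counter)
        (10 ^ 10)
      = (if ((s.toList.length : Int) - (solution.length : Int) + 1) ≤ 0 then (10 ^ 10 : Int)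
         else
          min (10 ^ 10) ((solution.length : Int) -
            ((PySem.List.max?
              ((PySem.List.enumerate s.toList 0).foldl
                (fun mism pch =>
                  (pvCols solution pch.2).foldl
                    (fun mism j =>
                      let i := pch.1 - j
                      if 0 ≤ i ∧ i < ((s.toList.length : Int) - (solution.length : Int) + 1)
                      then PySem.List.pySetD mism i (PySem.List.pyGetD mism i 0 + 1)
                      else mism)
                    mism)
                (List.replicate ((s.toList.length : Int) - (solution.length : Int) + 1).toNat (0 : Int)))
              (fun x => x)).getD 0))) := by
  set sl := s.toList with hsl
  set k : Int := (solution.length : Int) with hk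
  by_cases hneg : ((sl.length : Int) - k + 1) ≤ 0
  · rw [if_pos hneg, PySem.List.pyRange_one_eq_nil hneg]
    rfl
  · rw [if_neg hneg]
    set wn : Nat := ((sl.length : Int) - k + 1).toNat with hwn
    have hWcast : ((sl.length : Int) - k + 1) = (wn : Int) := by omega
    have hkle : solution.length ≤ sl.length := by omega
    rw [hWcast]
    -- B side: characterise mism as the list of match counts
    have hrep : List.replicate wn (0 : Int)
        = (List.range wn).map (fun _ => (0 : Int)) := by
      rw [List.map_const', List.length_range]
    have houter := pv_outer solution wn sl 0 (fun _ => (0 : Int))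
    rw [Nat.cast_zero] at houter
    have hMm : (List.range wn).map (fun i => (0 : Int) + pvTot solution sl 0 i)
        = (List.range wn).map (fun i => pvM solution sl i) := by
      apply List.map_congr_left
      intro i hi
      rw [List.mem_range] at hi
      rw [zero_add, pv_tot_eq_M solution sl i (by omega)]
    rw [hrep, houter, hMm]
    -- A side: the window loop as a fold of min over the hamming values
    rw [PySem.List.pyRange_one]
    have hr0 : ((wn : Int) - 0).toNat = wn := by omega
    rw [hr0, List.foldl_map]
    rw [PySem.List.foldl_congr_mem (List.range wn) _
      (fun acc t => if (k - pvM solution sl t) < acc then (k - pvM solution sl t) else acc)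
      ((10 : Int) ^ 10) ?agree]
    case agree =>
      intro acc t ht
      rw [List.mem_range] at ht
      dsimp only
      rw [zero_add, PySem.List.slice_natCast_add sl t solution.length,
        pv_ham_eq solution sl t (by omega)]
    rw [pv_fold_min_if (fun t => k - pvM solution sl t) (List.range wn)]
    have hmm : List.map (fun t => k - pvM solution sl t) (List.range wn)
        = List.map (fun x => k - x) (List.map (fun i => pvM solution sl i) (List.range wn)) := by
      rw [List.map_map]
      rfl
    rw [hmm]
    have hfmm := pv_fold_min_max k ((List.range wn).map (fun i => pvM solution sl i)) (k - 10 ^ 10)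
    rw [show k - (k - (10 : Int) ^ 10) = (10 : Int) ^ 10 by ring] at hfmm
    rw [hfmm]
    -- decompose the nonempty list of match counts
    obtain ⟨m, hm⟩ : ∃ m, wn = m + 1 := ⟨wn - 1, by omega⟩
    rw [hm, List.range_succ_eq_map, List.map_cons, List.foldl_cons, PySem.List.max?_id_cons,
      Option.getD_some, pv_foldl_max_max]
    omega

-- ===== VERDICT (by name: the statement is the Claim_ definition above) =====
theorem evaluate_motif_solution_spec : Claim_equal_evaluate_motif_solution := by
  intro problem solution _
  unfold Spec_evaluate_motif_solution evaluate_motif_solution evaluate_motif_solution_alt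
  dsimp only
  apply PySem.List.foldl_congr_mem
  intro acc s _
  have hd : ∀ ch : Char,
      ((PySem.Set.ofList (solution.map String.toList).flatten).foldl
        (fun d ch => d.insert ch
          ((PySem.List.pyRange 0 (solution.length : Int) 1).filter
            (fun j => PySem.Chars.isIn [ch] (PySem.List.pyGetD solution j "").toList)))
        PySem.Dict.empty).getD ch [] = pvCols solution ch := pv_getD_cols solution
  simp only [hd]
  rw [pv_perString solution s]
  split <;> rfl
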